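-- pv_equiv track=rewrite | github.com/aupc2061/Multi-LoRA | circuit_utils.py | build_cycle_schedule
-- ===== SOURCE A (Python) =====
-- from typing import Any, Sequence
--
-- def build_cycle_schedule(lora_ids: Sequence[str], num_steps: int, switch_step: int) -> list[str]:
--     if not lora_ids:
--         raise ValueError("lora_ids cannot be empty")
--     if switch_step <= 0:
--         raise ValueError("switch_step must be positive")
--     schedule: list[str] = []
--     idx = 0
--     for step in range(num_steps):
--         schedule.append(lora_ids[idx])
--         if (step + 1) % switch_step == 0:
--             idx = (idx + 1) % len(lora_ids)
--     return schedule
-- ===== SOURCE B (Python) =====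
-- def build_cycle_schedule(lora_ids, num_steps, switch_step):
--     if not lora_ids:
--         raise ValueError("lora_ids cannot be empty")
--     if switch_step <= 0:
--         raise ValueError("switch_step must be positive")
--     n = len(lora_ids)
--     blocks = (num_steps + switch_step - 1) // switch_step  # ceil(num_steps / switch_step)
--     out = []
--     for b in range(blocks):
--         out += [lora_ids[b % n]] * min(switch_step, num_steps - b * switch_step)
--     return out
-- ===== Notes on version B (the rewrite author's own statement) =====
-- stated objective: alternative
-- what changed: Instead of a per-step loop with a running idx counter and a conditional (step+1)%switch_step increment, B builds the schedule block-wise: ceil(num_steps/switch_step) replicated blocks of min(switch_step, steps remaining) copies of the cycling id.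
import Mathlib
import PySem

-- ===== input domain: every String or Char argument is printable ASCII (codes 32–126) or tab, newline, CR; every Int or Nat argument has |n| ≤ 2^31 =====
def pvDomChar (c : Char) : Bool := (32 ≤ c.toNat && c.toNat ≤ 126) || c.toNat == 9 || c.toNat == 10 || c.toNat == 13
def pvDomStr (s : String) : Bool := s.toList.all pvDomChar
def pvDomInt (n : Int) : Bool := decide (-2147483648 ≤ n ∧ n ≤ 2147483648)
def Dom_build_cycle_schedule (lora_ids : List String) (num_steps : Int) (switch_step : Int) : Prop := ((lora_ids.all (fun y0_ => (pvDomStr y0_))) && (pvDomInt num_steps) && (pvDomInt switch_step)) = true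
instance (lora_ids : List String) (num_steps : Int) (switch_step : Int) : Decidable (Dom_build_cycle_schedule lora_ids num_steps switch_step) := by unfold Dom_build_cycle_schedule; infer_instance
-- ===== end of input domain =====

-- B builds the schedule block-wise (replicate a switch_step-sized block per cycle
-- index, then truncate) instead of A's per-step loop with a running idx counter
-- (objective: alternative decomposition, same cost).


-- ===== PORT A =====
-- loop 'for step in range(num_steps)' carrying (schedule, idx); the two 'raise ValueError'
-- guards return [] here — those inputs are excluded by Pre_build_cycle_schedule.
def build_cycle_schedule (lora_ids : List String) (num_steps : Int) (switch_step : Int) : List String :=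
  if lora_ids = [] then []                 -- Python: raise ValueError
  else if switch_step ≤ 0 then []          -- Python: raise ValueError
  else
    ((PySem.List.pyRange 0 num_steps 1).foldl
      (fun (st : List String × Int) step =>
        (st.1 ++ [(PySem.List.pyGet? lora_ids st.2).getD ""],
         if PySem.Int.mod (step + 1) switch_step = 0 then
           PySem.Int.mod (st.2 + 1) (lora_ids.length : Int)
         else st.2))
      ([], 0)).1

-- ===== PORT B =====
-- blocks = ceil(num_steps/switch_step); one replicated block per cycle index b,
-- the last block truncated by 'min'.  '[x] * k' with k : Int is List.replicate k.toNat
-- (Python: count ≤ 0 gives []).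
def build_cycle_schedule_alt (lora_ids : List String) (num_steps : Int) (switch_step : Int) : List String :=
  if lora_ids = [] then []                 -- Python: raise ValueError
  else if switch_step ≤ 0 then []          -- Python: raise ValueError
  else
    let n : Int := lora_ids.length
    let blocks := PySem.Int.floordiv (num_steps + switch_step - 1) switch_step
    (PySem.List.pyRange 0 blocks 1).foldl
      (fun acc b =>
        acc ++ List.replicate (min switch_step (num_steps - b * switch_step)).toNat
          ((PySem.List.pyGet? lora_ids (PySem.Int.mod b n)).getD ""))
      []

-- ===== PRECONDITION & SPEC =====
-- A raises ValueError exactly when lora_ids is empty or switch_step ≤ 0; Pre_ excludes those.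
def Pre_build_cycle_schedule (lora_ids : List String) (num_steps : Int) (switch_step : Int) : Prop :=
  lora_ids ≠ [] ∧ 0 < switch_step
instance (lora_ids : List String) (num_steps : Int) (switch_step : Int) : Decidable (Pre_build_cycle_schedule lora_ids num_steps switch_step) := by unfold Pre_build_cycle_schedule; infer_instance
def pvWitness_build_cycle_schedule : List String × Int × Int := (["a", "b"], 5, 2)
def Spec_build_cycle_schedule (lora_ids : List String) (num_steps : Int) (switch_step : Int) (out : List String) : Prop := out = build_cycle_schedule_alt lora_ids num_steps switch_step
instance (lora_ids : List String) (num_steps : Int) (switch_step : Int) (out : List String) : Decidable (Spec_build_cycle_schedule lora_ids num_steps switch_step out) := by unfold Spec_build_cycle_schedule; infer_instance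

-- ===== CLAIM (what is proved, stated in full; the proofs are below) =====
def Claim_equal_build_cycle_schedule : Prop := ∀ (lora_ids : List String) (num_steps : Int) (switch_step : Int), Dom_build_cycle_schedule lora_ids num_steps switch_step → Pre_build_cycle_schedule lora_ids num_steps switch_step → Spec_build_cycle_schedule lora_ids num_steps switch_step (build_cycle_schedule lora_ids num_steps switch_step)

-- ===== LEMMAS AND PROOFS =====

theorem fd_succ_of_mod_zero (s a : Int) (hs : 0 < s) (h : PySem.Int.mod (a+1) s = 0) :
    PySem.Int.floordiv (a+1) s = PySem.Int.floordiv a s + 1 := by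
  obtain ⟨k, hk⟩ := (PySem.Int.mod_eq_zero_iff_dvd (a+1) s).mp h
  rw [PySem.Int.floordiv_eq_ediv_of_pos hs, PySem.Int.floordiv_eq_ediv_of_pos hs]
  have hqr : s * (a / s) + a % s = a := Int.mul_ediv_add_emod a s
  have hr0 : 0 ≤ a % s := Int.emod_nonneg a (by omega)
  have hrs : a % s < s := Int.emod_lt_of_pos a hs
  have hd : a % s + 1 = s * (k - a / s) := by rw [mul_sub]; omega
  have hd1 : k - a / s = 1 := by
    rcases lt_trichotomy (k - a / s) 1 with h1 | h1 | h1
    · nlinarith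
    · exact h1
    · nlinarith
  exact ((Int.ediv_emod_unique hs).mpr ⟨by rw [mul_add, mul_one]; rw [hd1, mul_one] at hd; omega, le_refl 0, hs⟩).1

theorem fd_succ_of_mod_ne (s a : Int) (hs : 0 < s) (h : PySem.Int.mod (a+1) s ≠ 0) :
    PySem.Int.floordiv (a+1) s = PySem.Int.floordiv a s := by
  rw [PySem.Int.floordiv_eq_ediv_of_pos hs, PySem.Int.floordiv_eq_ediv_of_pos hs]
  have hqr : s * (a / s) + a % s = a := Int.mul_ediv_add_emod a s
  have hr0 : 0 ≤ a % s := Int.emod_nonneg a (by omega)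
  have hrs : a % s < s := Int.emod_lt_of_pos a hs
  have hne : a % s ≠ s - 1 := by
    intro he
    exact h ((PySem.Int.mod_eq_zero_iff_dvd (a+1) s).mpr ⟨a / s + 1, by rw [mul_add]; omega⟩)
  exact ((Int.ediv_emod_unique (r := a % s + 1) hs).mpr ⟨by omega, by omega, by omega⟩).1

-- A's loop invariant: after n steps the schedule is the closed-form map and idx is the closed form.
theorem cycle_fold_invariant (lora_ids : List String) (s : Int) (hs : 0 < s)
    (hlen : 0 < (lora_ids.length : Int)) (n : Nat) :
    (PySem.List.pyRange 0 (n : Int) 1).foldl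
      (fun (st : List String × Int) step =>
        (st.1 ++ [(PySem.List.pyGet? lora_ids st.2).getD ""],
         if PySem.Int.mod (step + 1) s = 0 then
           PySem.Int.mod (st.2 + 1) (lora_ids.length : Int)
         else st.2))
      ([], 0)
    = ((PySem.List.pyRange 0 (n : Int) 1).map
        (fun step =>
          (PySem.List.pyGet? lora_ids
            (PySem.Int.mod (PySem.Int.floordiv step s) (lora_ids.length : Int))).getD ""),
       PySem.Int.mod (PySem.Int.floordiv (n : Int) s) (lora_ids.length : Int)) := by
  induction n with
  | zero =>
    simp [PySem.List.pyRange_one_eq_nil (by omega : (0:Int) ≤ 0)]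
    rw [PySem.Int.floordiv_eq_ediv_of_pos hs, Int.zero_ediv,
        PySem.Int.mod_eq_emod_of_pos hlen, Int.zero_emod]
  | succ m ih =>
    have hcast : ((m + 1 : Nat) : Int) = (m : Int) + 1 := by push_cast; ring
    rw [hcast, PySem.List.pyRange_one_succ_right (by positivity), List.foldl_append, List.map_append, ih]
    simp only [List.foldl_cons, List.foldl_nil, List.map_cons, List.map_nil]
    by_cases h : PySem.Int.mod ((m : Int) + 1) s = 0
    · rw [if_pos h, fd_succ_of_mod_zero s (m : Int) hs h]
      refine Prod.ext rfl ?_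
      simp only
      rw [PySem.Int.mod_eq_emod_of_pos hlen, PySem.Int.mod_eq_emod_of_pos hlen,
          PySem.Int.mod_eq_emod_of_pos hlen]
      conv_rhs => rw [Int.add_emod]
      conv_lhs => rw [Int.add_emod]
      simp [Int.emod_emod_of_dvd]
    · rw [if_neg h, fd_succ_of_mod_ne s (m : Int) hs h]

-- floordiv is constant on a block: b*s ≤ step < b*s + s ⟹ step // s = b.
theorem fd_const_on_block (s b step : Int) (hs : 0 < s)
    (h1 : b * s ≤ step) (h2 : step < b * s + s) :
    PySem.Int.floordiv step s = b := by
  rw [PySem.Int.floordiv_eq_ediv_of_pos hs]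
  exact ((Int.ediv_emod_unique (r := step - b * s) hs).mpr
    ⟨by linarith [mul_comm s b], by linarith, by linarith⟩).1

-- A (truncated) block of the closed-form map is a replicated constant.
theorem map_block_eq_replicate (lora_ids : List String) (s b e : Int) (hs : 0 < s)
    (he : e ≤ b * s + s) :
    (PySem.List.pyRange (b * s) e 1).map
      (fun step =>
        (PySem.List.pyGet? lora_ids
          (PySem.Int.mod (PySem.Int.floordiv step s) (lora_ids.length : Int))).getD "")
    = List.replicate (e - b * s).toNat
        ((PySem.List.pyGet? lora_ids
          (PySem.Int.mod b (lora_ids.length : Int))).getD "") := by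
  rw [List.eq_replicate_iff]
  constructor
  · rw [List.length_map, PySem.List.length_pyRange_one]
  · intro x hx
    obtain ⟨step, hmem, hxeq⟩ := List.mem_map.mp hx
    obtain ⟨h1, h2⟩ := (PySem.List.mem_pyRange_one).mp hmem
    rw [← hxeq, fd_const_on_block s b step hs h1 (by omega)]

-- B's block loop builds exactly the closed-form map over min(blocks*s, num_steps) steps.
theorem block_fold_eq_map (lora_ids : List String) (s N : Int) (hs : 0 < s) (k : Nat) :
    (PySem.List.pyRange 0 (k : Int) 1).foldl
      (fun acc b =>
        acc ++ List.replicate (min s (N - b * s)).toNat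
          ((PySem.List.pyGet? lora_ids (PySem.Int.mod b (lora_ids.length : Int))).getD ""))
      []
    = (PySem.List.pyRange 0 (min ((k : Int) * s) N) 1).map
        (fun step =>
          (PySem.List.pyGet? lora_ids
            (PySem.Int.mod (PySem.Int.floordiv step s) (lora_ids.length : Int))).getD "") := by
  induction k with
  | zero =>
    simp only [Nat.cast_zero, zero_mul]
    rw [PySem.List.pyRange_one_eq_nil (le_refl (0:Int)),
      PySem.List.pyRange_one_eq_nil (min_le_left 0 N)]
    rfl
  | succ m ih =>
    have hcast : ((m + 1 : Nat) : Int) = (m : Int) + 1 := by push_cast; ring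
    have hms : (m : Int) * s ≤ ((m : Int) + 1) * s := by nlinarith [Nat.cast_nonneg (α := Int) m]
    rw [hcast, PySem.List.pyRange_one_succ_right (by positivity), List.foldl_append, ih]
    simp only [List.foldl_cons, List.foldl_nil]
    by_cases hA : ((m : Int) + 1) * s ≤ N
    · have hm : (m : Int) * s ≤ N := le_trans hms hA
      have hmin1 : min (((m : Int) + 1) * s) N = ((m : Int) + 1) * s := min_eq_left hA
      have hmin2 : min ((m : Int) * s) N = (m : Int) * s := min_eq_left hm
      have hmin3 : min s (N - (m : Int) * s) = s := min_eq_left (by nlinarith)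
      rw [hmin1, hmin2, hmin3,
        show ((m : Int) + 1) * s = (m : Int) * s + s by ring,
        PySem.List.pyRange_one_append 0 ((m : Int) * s) ((m : Int) * s + s)
          (by positivity) (by linarith),
        List.map_append,
        map_block_eq_replicate lora_ids s (m : Int) ((m : Int) * s + s) hs (le_refl _),
        show (m : Int) * s + s - (m : Int) * s = s by ring]
    · have hexp : ((m : Int) + 1) * s = (m : Int) * s + s := by ring
      have hA' : N < ((m : Int) + 1) * s := not_le.mp hA
      by_cases hB : (m : Int) * s ≤ N
      · have hmin1 : min (((m : Int) + 1) * s) N = N := min_eq_right (le_of_lt hA')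
        have hmin2 : min ((m : Int) * s) N = (m : Int) * s := min_eq_left hB
        have hmin3 : min s (N - (m : Int) * s) = N - (m : Int) * s :=
          min_eq_right (by linarith)
        rw [hmin1, hmin2, hmin3,
          PySem.List.pyRange_one_append 0 ((m : Int) * s) N (by positivity) hB,
          List.map_append,
          map_block_eq_replicate lora_ids s (m : Int) N hs (by linarith)]
      · have hB' : N < (m : Int) * s := not_le.mp hB
        have hmin1 : min (((m : Int) + 1) * s) N = N := min_eq_right (le_of_lt hA')
        have hmin2 : min ((m : Int) * s) N = N := min_eq_right (le_of_lt hB')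
        have hmin3 : (min s (N - (m : Int) * s)).toNat = 0 :=
          Int.toNat_of_nonpos (le_trans (min_le_right _ _) (by linarith))
        rw [hmin1, hmin2, hmin3, List.replicate_zero, List.append_nil]

-- ===== VERDICT (by name: the statement is the Claim_ definition above) =====
theorem build_cycle_schedule_spec : Claim_equal_build_cycle_schedule := by
  intro lora_ids num_steps switch_step _hdom hpre
  obtain ⟨hne, hs⟩ := hpre
  unfold Spec_build_cycle_schedule build_cycle_schedule build_cycle_schedule_alt
  rw [if_neg hne, if_neg (by omega), if_neg hne, if_neg (by omega)]
  simp only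
  set s := switch_step with hsdef
  set blocks := PySem.Int.floordiv (num_steps + s - 1) s with hb
  have hbq : s * ((num_steps + s - 1) / s) + (num_steps + s - 1) % s = num_steps + s - 1 :=
    Int.mul_ediv_add_emod _ s
  have hr0 : 0 ≤ (num_steps + s - 1) % s := Int.emod_nonneg _ (by omega)
  have hrs : (num_steps + s - 1) % s < s := Int.emod_lt_of_pos _ hs
  have hbe : blocks = (num_steps + s - 1) / s := by
    rw [hb, PySem.Int.floordiv_eq_ediv_of_pos hs]
  by_cases hn : num_steps ≤ 0
  · have hbneg : blocks ≤ 0 := by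
      rw [hbe]; nlinarith [hbq, hr0, hrs]
    rw [PySem.List.pyRange_one_eq_nil hn, PySem.List.pyRange_one_eq_nil hbneg]
    rfl
  · rw [not_le] at hn
    have hbpos : 0 < blocks := by
      rw [hbe]; nlinarith [hbq, hr0, hrs]
    have hle : num_steps ≤ blocks * s := by
      rw [hbe]; nlinarith [hbq, hr0, hrs]
    have hN : num_steps = ((num_steps.toNat : Nat) : Int) := by omega
    have hK : blocks = ((blocks.toNat : Nat) : Int) := by omega
    rw [hN, cycle_fold_invariant lora_ids s hs
          (by simpa using List.length_pos_iff.mpr hne) num_steps.toNat]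
    rw [hK, block_fold_eq_map lora_ids s ((num_steps.toNat : Nat) : Int) hs blocks.toNat]
    have hmin : min ((blocks.toNat : Int) * s) ((num_steps.toNat : Nat) : Int)
        = ((num_steps.toNat : Nat) : Int) :=
      min_eq_right (by rw [← hK, ← hN]; exact hle)
    rw [hmin]
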